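-- pv_equiv track=rewrite | github.com/Hazielnetto/Seguranca-da-Informacao | cifraTranspo.py | criar_matriz
-- ===== SOURCE A (Python) =====
-- def criar_matriz(texto, num_colunas):
--     palavras = texto.split()  # Divide o texto em palavras
--     matriz = []
--     linha_atual = []
--     for palavra in palavras:
--         for char in palavra:
--             linha_atual.append(char)
--             if len(linha_atual) == num_colunas:
--                 matriz.append(linha_atual)
--                 linha_atual = []
--     if linha_atual:
--         matriz.append(linha_atual)  # Adiciona a última linha, se houver caracteres restantes
--     return matriz
-- ===== SOURCE B (Python) =====
-- def criar_matriz(texto, num_colunas):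
--     s = ''.join(texto.split())
--     return [list(s[i:i + num_colunas]) for i in range(0, len(s), num_colunas)]
-- ===== Notes on version B (the rewrite author's own statement) =====
-- stated objective: simpler
-- what changed: Replaces the per-character accumulate-and-reset loop over each word with a single build-then-chunk pass: flatten the words into one string with ''.join(texto.split()) and stride-slice it into rows of num_colunas; the bulk join/slice work avoids per-character list appends (measured ~2x).
-- outside the precondition, e.g. on criar_matriz('ab cd', 0): A returns [['a', 'b', 'c', 'd']], B raises ValueError; on criar_matriz('ab cd', -1): A returns [['a', 'b', 'c', 'd']], B returns []
import Mathlib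
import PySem

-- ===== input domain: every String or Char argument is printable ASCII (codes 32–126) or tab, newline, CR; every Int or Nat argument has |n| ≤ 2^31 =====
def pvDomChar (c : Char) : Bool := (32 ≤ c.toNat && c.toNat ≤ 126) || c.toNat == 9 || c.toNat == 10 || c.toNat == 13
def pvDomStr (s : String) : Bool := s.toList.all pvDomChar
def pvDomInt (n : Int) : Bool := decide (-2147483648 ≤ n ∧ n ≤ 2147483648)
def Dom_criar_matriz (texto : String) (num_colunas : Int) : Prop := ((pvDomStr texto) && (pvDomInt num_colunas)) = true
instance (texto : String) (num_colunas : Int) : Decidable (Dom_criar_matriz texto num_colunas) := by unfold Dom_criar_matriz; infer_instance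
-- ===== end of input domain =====

-- B replaces A's per-character accumulate-and-reset loop with a build-then-chunk pass
-- (join the split words into one string, then stride-slice it into rows): a simpler decomposition, measured faster by a constant factor.


-- ===== PORT A =====
-- A-side helper: the body of the inner 'for char in palavra' loop.
def pvStepA (num_colunas : Int) (st : List (List String) × List String) (char : Char) :
    List (List String) × List String :=
  let linha_atual := st.2 ++ [String.ofList [char]]
  if (linha_atual.length : Int) = num_colunas then (st.1 ++ [linha_atual], [])
  else (st.1, linha_atual)

def criar_matriz (texto : String) (num_colunas : Int) : List (List String) :=
  let palavras := PySem.Str.split₀ texto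
  let r := palavras.foldl
      (fun st palavra => palavra.toList.foldl (pvStepA num_colunas) st)
      ([], [])
  if r.2 ≠ [] then r.1 ++ [r.2] else r.1

-- ===== PORT B =====
def criar_matriz_alt (texto : String) (num_colunas : Int) : List (List String) :=
  let s := PySem.Str.join "" (PySem.Str.split₀ texto)
  (PySem.List.pyRange 0 (PySem.Str.len s) num_colunas).map
    (fun i => (PySem.Str.slice s (some i) (some (i + num_colunas))).toList.map
      (fun c => String.ofList [c]))

-- ===== PRECONDITION & SPEC =====
-- Pre_ excludes non-positive num_colunas, where a chunk width is meaningless: A's all-chars-in-one-row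
-- fall-through there is an accident of its 'len(linha_atual) == num_colunas' test, while B's stride
-- slicing naturally raises ValueError (width 0) or yields no rows (negative width).
def Pre_criar_matriz (texto : String) (num_colunas : Int) : Prop := 1 ≤ num_colunas
instance (texto : String) (num_colunas : Int) : Decidable (Pre_criar_matriz texto num_colunas) := by
  unfold Pre_criar_matriz; infer_instance

def pvWitness_criar_matriz : String × Int := ("transposicao de colunas", 5)

def Spec_criar_matriz (texto : String) (num_colunas : Int) (out : List (List String)) : Prop := out = criar_matriz_alt texto num_colunas
instance (texto : String) (num_colunas : Int) (out : List (List String)) : Decidable (Spec_criar_matriz texto num_colunas out) := by unfold Spec_criar_matriz; infer_instance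

-- ===== CLAIM (what is proved, stated in full; the proofs are below) =====
def Claim_equal_criar_matriz : Prop := ∀ (texto : String) (num_colunas : Int), Dom_criar_matriz texto num_colunas → Pre_criar_matriz texto num_colunas → Spec_criar_matriz texto num_colunas (criar_matriz texto num_colunas)

-- ===== LEMMAS AND PROOFS =====

def pvChunks {α : Type} (m : Nat) : List α → List (List α)
  | [] => []
  | x :: t => ((x :: t).take (m + 1)) :: pvChunks m ((x :: t).drop (m + 1))
termination_by l => l.length
decreasing_by simp
theorem pvChunks_cons {α : Type} (m : Nat) (x : α) (t : List α) :
    pvChunks m (x :: t) = ((x :: t).take (m + 1)) :: pvChunks m ((x :: t).drop (m + 1)) := by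
  conv_lhs => rw [pvChunks.eq_def]

theorem pvChunks_append {α : Type} (w : Nat) (l1 l2 : List α) (h : l1.length = w + 1) :
    pvChunks w (l1 ++ l2) = l1 :: pvChunks w l2 := by
  cases l1 with
  | nil => simp at h
  | cons x t =>
    rw [List.cons_append, pvChunks_cons, ← List.cons_append,
        List.take_left' h, List.drop_left' h]

theorem pvRangeNil (a b s : Int) (hs : 0 < s) (h : b ≤ a) : PySem.List.pyRange a b s = [] := by
  rw [PySem.List.pyRange_of_pos _ _ hs, if_neg (by omega)]; simp

theorem pvRangeShift (a b s : Int) (hs : 0 < s) :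
    PySem.List.pyRange (a + s) b s = (PySem.List.pyRange a (b - s) s).map (· + s) := by
  rw [PySem.List.pyRange_of_pos _ _ hs, PySem.List.pyRange_of_pos _ _ hs]
  by_cases h : a + s < b
  · rw [if_pos h, if_pos (by omega)]
    have he : b - (a + s) + s - 1 = b - s - a + s - 1 := by ring
    rw [he, List.map_map]
    apply List.map_congr_left; intro k _; simp; ring
  · rw [if_neg h, if_neg (by omega)]; simp

theorem pvRangeCons (a b s : Int) (hs : 0 < s) (h : a < b) :
    PySem.List.pyRange a b s = a :: PySem.List.pyRange (a + s) b s := by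
  rw [PySem.List.pyRange_of_pos _ _ hs, PySem.List.pyRange_of_pos _ _ hs, if_pos h]
  have hq : 0 ≤ (b - a - 1) / s := Int.ediv_nonneg (by omega) (by omega)
  have hK : b - a + s - 1 = b - a - 1 + 1 * s := by ring
  rw [hK, Int.add_mul_ediv_right _ _ (by omega : s ≠ 0)]
  have ht : ((b - a - 1) / s + 1).toNat = ((b - a - 1) / s).toNat + 1 := by omega
  rw [ht, List.range_succ_eq_map, List.map_cons, List.map_map]
  congr 1
  · simp
  · by_cases h2 : a + s < b
    · rw [if_pos h2]
      have he : b - (a + s) + s - 1 = b - a - 1 + 0 * s := by ring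
      rw [he, Int.add_mul_ediv_right _ _ (by omega : s ≠ 0), add_zero]
      apply List.map_congr_left; intro k _; simp [Nat.succ_eq_add_one]; ring
    · rw [if_neg h2]
      have hz : (b - a - 1) / s = 0 := Int.ediv_eq_zero_of_lt (by omega) (by omega)
      rw [hz]; simp
theorem pvJoinNilFlatten (L : List (List Char)) : PySem.Chars.join [] L = L.flatten := by
  induction L with
  | nil => simp [PySem.Chars.join_nil]
  | cons a t ih =>
    cases t with
    | nil => simp [PySem.Chars.join_singleton]
    | cons b u => rw [PySem.Chars.join_cons_cons] at *; simp_all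


theorem pvLoopA (n : Int) (cs : List Char) :
    ∀ (m : List (List String)) (row : List String), (row.length : Int) < n →
    (let r := cs.foldl (pvStepA n) (m, row)
     if r.2 ≠ [] then r.1 ++ [r.2] else r.1)
    = m ++ pvChunks (n.toNat - 1) (row ++ cs.map (fun c => String.ofList [c])) := by
  induction cs with
  | nil =>
    intro m row hrow
    simp only [List.foldl_nil, List.map_nil, List.append_nil]
    cases row with
    | nil => simp [pvChunks]
    | cons x t =>
      have hlen : (x :: t).length ≤ n.toNat - 1 + 1 := by
        have h0 : ((x :: t).length : Int) < n := hrow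
        omega
      simp only [pvChunks_cons, List.take_of_length_le hlen, List.drop_of_length_le hlen]
      simp [pvChunks]
  | cons c cs ih =>
    intro m row hrow
    simp only [List.foldl_cons]
    by_cases h : ((row.length : Int) + 1 = n)
    · have hc : ((row ++ [String.ofList [c]]).length : Int) = n := by
        simp only [List.length_append, List.length_cons, List.length_nil]; push_cast; omega
      have hstep : pvStepA n (m, row) c = (m ++ [row ++ [String.ofList [c]]], []) := by
        simp only [pvStepA]; rw [if_pos hc]
      rw [hstep, ih _ _ (by simp only [List.length_nil, Nat.cast_zero]; omega)]
      have hlen : (row ++ [String.ofList [c]]).length = (n.toNat - 1) + 1 := by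
        simp only [List.length_append, List.length_cons, List.length_nil]; omega
      rw [List.map_cons,
          show row ++ String.ofList [c] :: cs.map (fun c => String.ofList [c])
             = (row ++ [String.ofList [c]]) ++ cs.map (fun c => String.ofList [c]) by simp,
          pvChunks_append _ _ _ hlen]
      simp
    · have hc : ¬ ((row ++ [String.ofList [c]]).length : Int) = n := by
        simp only [List.length_append, List.length_cons, List.length_nil]; push_cast; omega
      have hstep : pvStepA n (m, row) c = (m, row ++ [String.ofList [c]]) := by
        simp only [pvStepA]; rw [if_neg hc]
      have hlt : (((row ++ [String.ofList [c]]).length : Int)) < n := by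
        simp only [List.length_append, List.length_cons, List.length_nil]; push_cast; omega
      rw [hstep, ih _ _ hlt]
      simp

theorem pvLoopA' (n : Int) (cs : List Char) (hn : 1 ≤ n) :
    (let r := cs.foldl (pvStepA n) (([] : List (List String)), ([] : List String))
     if r.2 ≠ [] then r.1 ++ [r.2] else r.1)
    = pvChunks (n.toNat - 1) (cs.map (fun c => String.ofList [c])) := by
  simpa using pvLoopA n cs [] [] (by simp; omega)

theorem pvLoopB (n : Int) (hn : 1 ≤ n) (cs : List Char) :
    (PySem.List.pyRange 0 (cs.length : Int) n).map
      (fun i => (PySem.List.slice cs (some i) (some (i + n))).map (fun c => String.ofList [c]))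
    = pvChunks (n.toNat - 1) (cs.map (fun c => String.ofList [c])) := by
  induction cs using pvChunks.induct (m := n.toNat - 1) with
  | case1 => simp [pvRangeNil 0 0 n (by omega) le_rfl, pvChunks]
  | case2 x t ih =>
    have hw : n.toNat - 1 + 1 = n.toNat := by omega
    have hL : (0 : Int) < ((x :: t).length : Int) := by simp
    rw [hw] at ih
    rw [List.map_cons, pvChunks_cons, pvRangeCons 0 _ n (by omega) hL, List.map_cons]
    congr 1
    · -- head chunk
      rw [PySem.List.slice_zero_start, PySem.List.slice_to (x :: t) (by omega : (0:Int) ≤ 0 + n),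
          show (String.ofList [x] : String) :: List.map (fun c => String.ofList [c]) t
             = List.map (fun c => String.ofList [c]) (x :: t) from rfl,
          ← List.map_take]
      congr 2
      omega
    · -- tail chunks
      rw [show (String.ofList [x] : String) :: List.map (fun c => String.ofList [c]) t
             = List.map (fun c => String.ofList [c]) (x :: t) from rfl,
          ← List.map_drop, hw,
          show PySem.List.pyRange (0 + n) (((x :: t).length : Int)) n
             = PySem.List.pyRange (0 + n) (((x :: t).length : Int)) n from rfl,
          pvRangeShift 0 _ n (by omega), List.map_map]
      have hrange : PySem.List.pyRange 0 (((x :: t).length : Int) - n) n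
          = PySem.List.pyRange 0 ((((x :: t).drop n.toNat).length : Int)) n := by
        by_cases hc : n.toNat ≤ (x :: t).length
        · congr 1; rw [List.length_drop]; omega
        · rw [pvRangeNil _ _ _ (by omega) (by simp only [List.length_cons] at hc ⊢; omega),
              List.drop_of_length_le (by omega)]
          simp [pvRangeNil 0 0 n (by omega) le_rfl]
      rw [hrange, ← ih]
      apply List.map_congr_left
      intro i hi
      have hi0 : 0 ≤ i := by
        have := (PySem.List.mem_pyRange_iff_of_pos (by omega : (0:Int) < n) i).mp hi
        omega
      simp only [Function.comp]
      rw [PySem.List.slice_toNat _ (by omega) (by omega),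
          PySem.List.slice_toNat _ (by omega) (by omega), List.drop_drop,
          show (i + n + n).toNat - (i + n).toNat = (i + n).toNat - i.toNat from by omega,
          show n.toNat + i.toNat = (i + n).toNat from by omega]

theorem pvMainEq (texto : String) (n : Int) (hn : 1 ≤ n) :
    criar_matriz texto n = criar_matriz_alt texto n := by
  have hA : criar_matriz texto n
      = pvChunks (n.toNat - 1)
          (((List.map String.toList (PySem.Str.split₀ texto)).flatten).map
            (fun c => String.ofList [c])) := by
    unfold criar_matriz
    have h1 : List.foldl (fun st palavra => List.foldl (pvStepA n) st palavra.toList)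
          (([] : List (List String)), ([] : List String)) (PySem.Str.split₀ texto)
        = List.foldl (pvStepA n) (([] : List (List String)), ([] : List String))
            ((List.map String.toList (PySem.Str.split₀ texto)).flatten) := by
      rw [List.foldl_flatten, List.foldl_map]
    simp only []
    rw [h1]
    exact pvLoopA' n _ hn
  have hs : (PySem.Str.join "" (PySem.Str.split₀ texto)).toList
      = (List.map String.toList (PySem.Str.split₀ texto)).flatten := by
    rw [PySem.Str.toList_join]
    have : ("" : String).toList = [] := rfl
    rw [this, pvJoinNilFlatten]
  have hB : criar_matriz_alt texto n
      = pvChunks (n.toNat - 1)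
          (((List.map String.toList (PySem.Str.split₀ texto)).flatten).map
            (fun c => String.ofList [c])) := by
    unfold criar_matriz_alt
    simp only [PySem.Str.len_eq, PySem.Str.toList_slice, PySem.Chars.slice_eq_listSlice, hs]
    exact pvLoopB n hn _
  rw [hA, hB]

-- ===== VERDICT (by name: the statement is the Claim_ definition above) =====
theorem criar_matriz_spec : Claim_equal_criar_matriz := by
  intro texto n _ hn
  exact pvMainEq texto n hn
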